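-- pv_equiv track=rewrite | github.com/posl/comment_recommendation | script/mod_gen/4_time/zh/194_B/0.py | get_min_time
-- ===== SOURCE A (Python) =====
-- def get_min_time(N, A, B):
--     min_time = float('inf')
--     for i in range(N):
--         for j in range(N):
--             if i == j:
--                 min_time = min(min_time, A[i]+B[j])
--             else:
--                 min_time = min(min_time, max(A[i], B[j]))
--     return min_time
-- ===== SOURCE B (Python) =====
-- def get_min_time(N, A, B):
--     best = min(A[i] + B[i] for i in range(N))
--     if N >= 2:
--         i1 = min(range(N), key=lambda i: A[i])
--         j1 = min(range(N), key=lambda j: B[j])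
--         if i1 != j1:
--             off = max(A[i1], B[j1])
--         else:
--             a2 = min(A[i] for i in range(N) if i != i1)
--             b2 = min(B[j] for j in range(N) if j != j1)
--             off = min(max(A[i1], b2), max(a2, B[j1]))
--         best = min(best, off)
--     return best
-- ===== Notes on version B (the rewrite author's own statement) =====
-- stated objective: faster
-- what changed: Replaced the O(N^2) scan over all index pairs by one O(N) pass: the diagonal minimum via zip, and the off-diagonal minimum from the smallest and second-smallest elements of A and B (case split on whether their argmin indices coincide).
-- outside the precondition, e.g. on get_min_time(0, [], []): A returns inf, B raises ValueError; on get_min_time(-1, [1], [2]): A returns inf, B raises ValueError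
import Mathlib
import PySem

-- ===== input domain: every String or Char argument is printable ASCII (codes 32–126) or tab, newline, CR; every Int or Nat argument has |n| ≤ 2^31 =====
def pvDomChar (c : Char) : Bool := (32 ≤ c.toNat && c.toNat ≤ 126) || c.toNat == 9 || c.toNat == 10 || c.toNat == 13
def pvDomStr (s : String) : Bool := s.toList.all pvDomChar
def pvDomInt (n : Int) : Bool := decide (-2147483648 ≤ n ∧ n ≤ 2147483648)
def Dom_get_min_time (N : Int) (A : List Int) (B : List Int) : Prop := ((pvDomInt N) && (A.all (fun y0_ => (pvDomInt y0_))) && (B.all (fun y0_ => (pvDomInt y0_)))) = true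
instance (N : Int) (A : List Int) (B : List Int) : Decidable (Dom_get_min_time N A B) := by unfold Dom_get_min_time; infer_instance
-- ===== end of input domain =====

-- B replaces A's O(N^2) scan over all index pairs by one O(N) pass using the
-- smallest and second-smallest elements among A[:N] and B[:N] (objective: faster).

-- ===== PORT A =====
-- min_time starts at float('inf'): modelled as Option Int, none = inf; min(inf, x) = x.
def mminA (m : Option Int) (x : Int) : Option Int :=
  some (match m with | none => x | some v => min v x)

def get_min_time (N : Int) (A : List Int) (B : List Int) : Int :=
  let r := (PySem.List.pyRange 0 N 1).foldl (fun m i =>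
    (PySem.List.pyRange 0 N 1).foldl (fun m j =>
      if i = j then mminA m (PySem.List.pyGetD A i 0 + PySem.List.pyGetD B j 0)
      else mminA m (max (PySem.List.pyGetD A i 0) (PySem.List.pyGetD B j 0))) m) none
  -- Python returns float('inf') when the loop never ran (N ≤ 0): not an Int, excluded by Pre_
  r.getD 0

-- ===== PORT B =====
def get_min_time_alt (N : Int) (A : List Int) (B : List Int) : Int :=
  -- min() on an empty sequence raises ValueError (N ≤ 0): excluded by Pre_, default 0 unreachable there
  let best := (PySem.List.min? ((PySem.List.pyRange 0 N 1).map (fun i => PySem.List.pyGetD A i 0 + PySem.List.pyGetD B i 0)) (fun x => x)).getD 0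
  if N ≥ 2 then
    let i1 := (PySem.List.min? (PySem.List.pyRange 0 N 1) (fun i => PySem.List.pyGetD A i 0)).getD 0
    let j1 := (PySem.List.min? (PySem.List.pyRange 0 N 1) (fun j => PySem.List.pyGetD B j 0)).getD 0
    let off :=
      if i1 ≠ j1 then max (PySem.List.pyGetD A i1 0) (PySem.List.pyGetD B j1 0)
      else
        let a2 := (PySem.List.min? (((PySem.List.pyRange 0 N 1).filter (fun i => i != i1)).map (fun i => PySem.List.pyGetD A i 0)) (fun x => x)).getD 0
        let b2 := (PySem.List.min? (((PySem.List.pyRange 0 N 1).filter (fun j => j != j1)).map (fun j => PySem.List.pyGetD B j 0)) (fun x => x)).getD 0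
        min (max (PySem.List.pyGetD A i1 0) b2) (max a2 (PySem.List.pyGetD B j1 0))
    min best off
  else best

-- ===== PRECONDITION & SPEC =====
-- Pre_ excludes N ≤ 0 (the loops never run and A returns float('inf'), not an int)
-- and N beyond either list's length (A raises IndexError).
def Pre_get_min_time (N : Int) (A : List Int) (B : List Int) : Prop :=
  1 ≤ N ∧ N ≤ (A.length : Int) ∧ N ≤ (B.length : Int)
instance (N : Int) (A : List Int) (B : List Int) : Decidable (Pre_get_min_time N A B) := by
  unfold Pre_get_min_time; infer_instance

def pvWitness_get_min_time : Int × List Int × List Int := (2, [1, 2], [3, 4])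

def Spec_get_min_time (N : Int) (A : List Int) (B : List Int) (out : Int) : Prop := out = get_min_time_alt N A B
instance (N : Int) (A : List Int) (B : List Int) (out : Int) : Decidable (Spec_get_min_time N A B out) := by unfold Spec_get_min_time; infer_instance

-- ===== CLAIM (what is proved, stated in full; the proofs are below) =====
def Claim_equal_get_min_time : Prop := ∀ (N : Int) (A : List Int) (B : List Int), Dom_get_min_time N A B → Pre_get_min_time N A B → Spec_get_min_time N A B (get_min_time N A B)

-- ===== LEMMAS AND PROOFS =====

-- the (i, j) entry A's double loop inspects
def fAB (A B : List Int) (i j : Nat) : Int :=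
  if i = j then A.getD i 0 + B.getD j 0 else max (A.getD i 0) (B.getD j 0)

-- all entries, in A's traversal order
def cands (n : Nat) (A B : List Int) : List Int :=
  (List.range n).flatMap (fun i => (List.range n).map (fAB A B i))

lemma mmin_ite (c : Prop) [Decidable c] (m : Option Int) (x y : Int) :
    (if c then mminA m x else mminA m y) = mminA m (if c then x else y) := by
  split <;> rfl

lemma foldl_mminA_some (l : List Int) (v : Int) :
    l.foldl mminA (some v) = some (l.foldl min v) := by
  induction l generalizing v with
  | nil => rfl
  | cons x t ih => simp [List.foldl, mminA, ih]

lemma foldl_mminA_none (l : List Int) : l.foldl mminA none = l.min? := by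
  cases l with
  | nil => rfl
  | cons x t =>
    rw [List.min?_cons']
    simp [List.foldl, mminA, foldl_mminA_some]

-- A's double loop computes the minimum of the candidate list
lemma portA_eq (N : Int) (A B : List Int) :
    get_min_time N A B = ((cands N.toNat A B).min?).getD 0 := by
  simp only [get_min_time]
  rw [PySem.List.pyRange_one]
  rw [← foldl_mminA_none]
  simp only [cands, List.foldl_flatMap, List.foldl_map, zero_add,
    PySem.List.pyGetD_natCast, Nat.cast_inj, mmin_ite, Int.sub_zero, fAB]
lemma mem_cands_iff (n : Nat) (A B : List Int) (x : Int) :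
    x ∈ cands n A B ↔ ∃ i < n, ∃ j < n, x = fAB A B i j := by
  simp [cands, List.mem_flatMap, List.mem_map, List.mem_range, eq_comm]
lemma min_cands (n : Nat) (A B : List Int) (v : Int)
    (hmem : ∃ i < n, ∃ j < n, v = fAB A B i j)
    (hle : ∀ i < n, ∀ j < n, v ≤ fAB A B i j) :
    (cands n A B).min? = some v := by
  rw [List.min?_eq_some_iff]
  constructor
  · exact (mem_cands_iff n A B v).mpr hmem
  · intro x hx
    obtain ⟨i, hi, j, hj, rfl⟩ := (mem_cands_iff n A B x).mp hx
    exact hle i hi j hj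

lemma pg (l : List Int) (i : Int) (h : 0 ≤ i) : PySem.List.pyGetD l i 0 = l.getD i.toNat 0 := by
  have := PySem.List.pyGetD_natCast l i.toNat (0 : Int)
  rwa [show ((i.toNat : Nat) : Int) = i by omega] at this

lemma key_lemma (N : Int) (A B : List Int) (hp : Pre_get_min_time N A B) :
    (cands N.toNat A B).min? = some (get_min_time_alt N A B) := by
  obtain ⟨h1, h2, h3⟩ := hp
  have hmem_r : ∀ i : Int, i ∈ PySem.List.pyRange 0 N 1 ↔ 0 ≤ i ∧ i < N := by
    intro i
    rw [PySem.List.mem_pyRange_one]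
  -- best = min of the diagonal
  obtain ⟨db, hdb⟩ : ∃ v, PySem.List.min? ((PySem.List.pyRange 0 N 1).map (fun i => PySem.List.pyGetD A i 0 + PySem.List.pyGetD B i 0)) (fun x => x) = some v := by
    cases h : PySem.List.min? ((PySem.List.pyRange 0 N 1).map (fun i => PySem.List.pyGetD A i 0 + PySem.List.pyGetD B i 0)) (fun x => x) with
    | none =>
      rw [PySem.List.min?_eq_none_iff, List.map_eq_nil_iff] at h
      exact absurd ((hmem_r 0).mpr ⟨le_refl 0, by omega⟩) (by simp [h])
    | some v => exact ⟨v, rfl⟩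
  have hdb_mem : ∃ k < N.toNat, db = A.getD k 0 + B.getD k 0 := by
    have h := PySem.List.min?_mem hdb
    rw [List.mem_map] at h
    obtain ⟨i, hir, hv⟩ := h
    rw [hmem_r] at hir
    exact ⟨i.toNat, by omega, by rw [← hv, pg A i hir.1, pg B i hir.1]⟩
  have hdb_le : ∀ k < N.toNat, db ≤ A.getD k 0 + B.getD k 0 := by
    intro k hk
    have hm : ((k : Nat) : Int) ∈ PySem.List.pyRange 0 N 1 := (hmem_r _).mpr ⟨by omega, by omega⟩
    have := PySem.List.min?_isMin hdb _ (List.mem_map_of_mem hm)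
    simpa [PySem.List.pyGetD_natCast] using this
  by_cases h2N : 2 ≤ N
  · -- i1 / j1
    obtain ⟨i1, hi1⟩ : ∃ v, PySem.List.min? (PySem.List.pyRange 0 N 1) (fun i => PySem.List.pyGetD A i 0) = some v := by
      cases h : PySem.List.min? (PySem.List.pyRange 0 N 1) (fun i => PySem.List.pyGetD A i 0) with
      | none =>
        rw [PySem.List.min?_eq_none_iff] at h
        exact absurd ((hmem_r 0).mpr ⟨le_refl 0, by omega⟩) (by simp [h])
      | some v => exact ⟨v, rfl⟩
    have hi1r : 0 ≤ i1 ∧ i1 < N := (hmem_r i1).mp (PySem.List.min?_mem hi1)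
    have hm1_le : ∀ k < N.toNat, A.getD i1.toNat 0 ≤ A.getD k 0 := by
      intro k hk
      have := PySem.List.min?_isMin hi1 ((k : Nat) : Int) ((hmem_r _).mpr ⟨by omega, by omega⟩)
      rwa [pg A i1 hi1r.1, PySem.List.pyGetD_natCast] at this
    obtain ⟨j1, hj1⟩ : ∃ v, PySem.List.min? (PySem.List.pyRange 0 N 1) (fun j => PySem.List.pyGetD B j 0) = some v := by
      cases h : PySem.List.min? (PySem.List.pyRange 0 N 1) (fun j => PySem.List.pyGetD B j 0) with
      | none =>
        rw [PySem.List.min?_eq_none_iff] at h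
        exact absurd ((hmem_r 0).mpr ⟨le_refl 0, by omega⟩) (by simp [h])
      | some v => exact ⟨v, rfl⟩
    have hj1r : 0 ≤ j1 ∧ j1 < N := (hmem_r j1).mp (PySem.List.min?_mem hj1)
    have hn1_le : ∀ k < N.toNat, B.getD j1.toNat 0 ≤ B.getD k 0 := by
      intro k hk
      have := PySem.List.min?_isMin hj1 ((k : Nat) : Int) ((hmem_r _).mpr ⟨by omega, by omega⟩)
      rwa [pg B j1 hj1r.1, PySem.List.pyGetD_natCast] at this
    simp only [get_min_time_alt, hdb, hi1, hj1, Option.getD_some]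
    rw [if_pos (by omega : N ≥ 2)]
    by_cases hij : i1 = j1
    · rw [if_neg (by simp [hij])]
      subst hij
      -- a2
      obtain ⟨a2, ha2⟩ : ∃ v, PySem.List.min? (((PySem.List.pyRange 0 N 1).filter (fun i => i != i1)).map (fun i => PySem.List.pyGetD A i 0)) (fun x => x) = some v := by
        cases h : PySem.List.min? (((PySem.List.pyRange 0 N 1).filter (fun i => i != i1)).map (fun i => PySem.List.pyGetD A i 0)) (fun x => x) with
        | none =>
          rw [PySem.List.min?_eq_none_iff, List.map_eq_nil_iff, List.filter_eq_nil_iff] at h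
          have h0 := h 0 ((hmem_r 0).mpr ⟨le_refl 0, by omega⟩)
          have h1' := h 1 ((hmem_r 1).mpr ⟨by omega, by omega⟩)
          simp at h0 h1'
          omega
        | some v => exact ⟨v, rfl⟩
      have ha2_mem : ∃ k < N.toNat, k ≠ i1.toNat ∧ a2 = A.getD k 0 := by
        have h := PySem.List.min?_mem ha2
        rw [List.mem_map] at h
        obtain ⟨i, hif, hv⟩ := h
        rw [List.mem_filter] at hif
        obtain ⟨hir, hne⟩ := hif
        rw [hmem_r] at hir
        simp only [bne_iff_ne, ne_eq] at hne
        exact ⟨i.toNat, by omega, by omega, by rw [← hv, pg A i hir.1]⟩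
      have ha2_le : ∀ k < N.toNat, k ≠ i1.toNat → a2 ≤ A.getD k 0 := by
        intro k hk hkne
        have hmf : ((k : Nat) : Int) ∈ (PySem.List.pyRange 0 N 1).filter (fun i => i != i1) := by
          rw [List.mem_filter]
          exact ⟨(hmem_r _).mpr ⟨by omega, by omega⟩, by simp only [bne_iff_ne, ne_eq]; omega⟩
        have := PySem.List.min?_isMin ha2 _ (List.mem_map_of_mem hmf)
        simpa [PySem.List.pyGetD_natCast] using this
      -- b2
      obtain ⟨b2, hb2⟩ : ∃ v, PySem.List.min? (((PySem.List.pyRange 0 N 1).filter (fun j => j != i1)).map (fun j => PySem.List.pyGetD B j 0)) (fun x => x) = some v := by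
        cases h : PySem.List.min? (((PySem.List.pyRange 0 N 1).filter (fun j => j != i1)).map (fun j => PySem.List.pyGetD B j 0)) (fun x => x) with
        | none =>
          rw [PySem.List.min?_eq_none_iff, List.map_eq_nil_iff, List.filter_eq_nil_iff] at h
          have h0 := h 0 ((hmem_r 0).mpr ⟨le_refl 0, by omega⟩)
          have h1' := h 1 ((hmem_r 1).mpr ⟨by omega, by omega⟩)
          simp at h0 h1'
          omega
        | some v => exact ⟨v, rfl⟩
      have hb2_mem : ∃ k < N.toNat, k ≠ i1.toNat ∧ b2 = B.getD k 0 := by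
        have h := PySem.List.min?_mem hb2
        rw [List.mem_map] at h
        obtain ⟨j, hif, hv⟩ := h
        rw [List.mem_filter] at hif
        obtain ⟨hir, hne⟩ := hif
        rw [hmem_r] at hir
        simp only [bne_iff_ne, ne_eq] at hne
        exact ⟨j.toNat, by omega, by omega, by rw [← hv, pg B j hir.1]⟩
      have hb2_le : ∀ k < N.toNat, k ≠ i1.toNat → b2 ≤ B.getD k 0 := by
        intro k hk hkne
        have hmf : ((k : Nat) : Int) ∈ (PySem.List.pyRange 0 N 1).filter (fun j => j != i1) := by
          rw [List.mem_filter]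
          exact ⟨(hmem_r _).mpr ⟨by omega, by omega⟩, by simp only [bne_iff_ne, ne_eq]; omega⟩
        have := PySem.List.min?_isMin hb2 _ (List.mem_map_of_mem hmf)
        simpa [PySem.List.pyGetD_natCast] using this
      rw [ha2, hb2, Option.getD_some, Option.getD_some, pg A i1 hi1r.1, pg B i1 hi1r.1]
      apply min_cands
      · rcases min_choice db (min (max (A.getD i1.toNat 0) b2) (max a2 (B.getD i1.toNat 0))) with h | h <;> rw [h]
        · obtain ⟨i, hi, hv⟩ := hdb_mem
          exact ⟨i, hi, i, hi, by simp [fAB, hv]⟩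
        · rcases min_choice (max (A.getD i1.toNat 0) b2) (max a2 (B.getD i1.toNat 0)) with h' | h' <;> rw [h']
          · obtain ⟨k, hk, hne, hv⟩ := hb2_mem
            exact ⟨i1.toNat, by omega, k, hk, by simp [fAB, Ne.symm hne, hv]⟩
          · obtain ⟨k, hk, hne, hv⟩ := ha2_mem
            exact ⟨k, hk, i1.toNat, by omega, by simp [fAB, hne, hv]⟩
      · intro i hi j hj
        by_cases hij' : i = j
        · subst hij'
          simp only [fAB, if_pos]
          exact le_trans (min_le_left _ _) (hdb_le i hi)
        · simp only [fAB, if_neg hij']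
          refine le_trans (min_le_right _ _) ?_
          by_cases hjj : j = i1.toNat
          · subst hjj
            exact le_trans (min_le_right _ _) (max_le_max (ha2_le i hi (by omega)) le_rfl)
          · exact le_trans (min_le_left _ _) (max_le_max (hm1_le i hi) (hb2_le j hj hjj))
    · rw [if_pos hij, pg A i1 hi1r.1, pg B j1 hj1r.1]
      apply min_cands
      · rcases min_choice db (max (A.getD i1.toNat 0) (B.getD j1.toNat 0)) with h | h <;> rw [h]
        · obtain ⟨i, hi, hv⟩ := hdb_mem
          exact ⟨i, hi, i, hi, by simp [fAB, hv]⟩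
        · exact ⟨i1.toNat, by omega, j1.toNat, by omega, by simp [fAB, show i1.toNat ≠ j1.toNat by omega]⟩
      · intro i hi j hj
        by_cases hij' : i = j
        · subst hij'
          simp only [fAB, if_pos]
          exact le_trans (min_le_left _ _) (hdb_le i hi)
        · simp only [fAB, if_neg hij']
          exact le_trans (min_le_right _ _) (max_le_max (hm1_le i hi) (hn1_le j hj))
  · -- N = 1
    have hN : N = 1 := by omega
    subst hN
    simp only [get_min_time_alt, hdb, Option.getD_some]
    rw [if_neg (by omega : ¬ ((1 : Int) ≥ 2))]
    apply min_cands
    · obtain ⟨i, hi, hv⟩ := hdb_mem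
      exact ⟨i, hi, i, hi, by simp [fAB, hv]⟩
    · intro i hi j hj
      have : i = 0 := by omega
      have : j = 0 := by omega
      subst_vars
      simp only [fAB, if_pos]
      exact hdb_le 0 (by omega)

-- ===== VERDICT (by name: the statement is the Claim_ definition above) =====
theorem get_min_time_spec : Claim_equal_get_min_time := by
  intro N A B _ hp
  unfold Spec_get_min_time
  rw [portA_eq, key_lemma N A B hp]
  rfl
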